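-- pv_equiv track=rewrite | github.com/ryancheley/PyBites | Bite118/Bite118.py | get_duplicate_indices
-- ===== SOURCE A (Python) =====
-- from collections import Counter
--
-- def get_duplicate_indices(words):
--     """Given a list of words, loop through the words and check for each
--        word if it occurs more than once.
--        If so return the index of its first occurrence.
--        For example in the following list 'is' and 'it'
--        occur more than once, and they are at indices 0 and 1 so you would
--        return [0, 1]:
--        ['is', 'it', 'true', 'or', 'is', 'it', 'not?'] => [0, 1]
--        Make sure the returning list is unique and sorted in ascending order."""
--     result = []
--     words_counter = Counter(words)
--     word_counts = words_counter.most_common()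
--     words_that_come_up_more_than_once = [i[0] for i in word_counts if i[1] >1]
--     for w in words_that_come_up_more_than_once:
--         result.append(words.index(w))
--     return sorted(result)
-- ===== SOURCE B (Python) =====
-- def get_duplicate_indices(words):
--     first = {}
--     dups = set()
--     for i, w in enumerate(words):
--         if w in first:
--             dups.add(first[w])
--         else:
--             first[w] = i
--     return sorted(dups)
-- ===== Notes on version B (the rewrite author's own statement) =====
-- stated objective: faster
-- what changed: Single pass recording each word's first index in a dict and collecting that index into a set on any repeat, replacing Counter + most_common + a repeated words.index scan per duplicated word.
import Mathlib
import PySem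

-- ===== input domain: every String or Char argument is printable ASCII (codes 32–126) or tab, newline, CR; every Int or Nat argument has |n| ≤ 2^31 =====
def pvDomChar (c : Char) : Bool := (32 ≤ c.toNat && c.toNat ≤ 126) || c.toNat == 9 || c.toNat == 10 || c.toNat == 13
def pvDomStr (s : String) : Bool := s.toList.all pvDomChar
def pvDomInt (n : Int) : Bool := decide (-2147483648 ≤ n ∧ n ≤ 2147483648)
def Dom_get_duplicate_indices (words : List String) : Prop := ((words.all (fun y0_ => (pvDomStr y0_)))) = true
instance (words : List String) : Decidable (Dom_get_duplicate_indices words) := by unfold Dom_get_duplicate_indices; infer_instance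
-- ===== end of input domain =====

-- B replaces A's Counter + most_common + repeated words.index scans by a single pass that
-- records each word's first index in a dict and collects it into a set on any repeat (objective: faster, constant-factor).

-- ===== PORT A =====
def get_duplicate_indices (words : List String) : List Int :=
  let result : List Int := []
  let words_counter : PySem.Dict String Int := PySem.Dict.counter words
  -- most_common() = sorted(items, key=itemgetter(1), reverse=True), stable
  let word_counts := PySem.List.sorted words_counter.items (fun p => p.2) true
  let more := (word_counts.filter (fun p => decide (p.2 > 1))).map (fun p => p.1)
  -- words.index(w): w always occurs in words here, so index? is always some; getD 0 is exact
  let result := more.foldl (fun acc w => acc ++ [((PySem.List.index? words w).getD 0 : Int)]) result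
  PySem.List.sorted result (fun x => x) false

-- ===== PORT B =====
-- loop body of B's single pass: (first-index dict, set of duplicate first indices)
def pvStepB (st : PySem.Dict String Int × PySem.Set Int) (p : Int × String) :
    PySem.Dict String Int × PySem.Set Int :=
  if st.1.contains p.2 then (st.1, PySem.Set.add st.2 (st.1.getD p.2 0))
  else (st.1.insert p.2 p.1, st.2)

def get_duplicate_indices_alt (words : List String) : List Int :=
  let st := (PySem.List.enumerate words 0).foldl pvStepB (PySem.Dict.empty, PySem.Set.empty)
  PySem.List.sorted st.2 (fun x => x) false

-- ===== PRECONDITION & SPEC =====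
def Spec_get_duplicate_indices (words : List String) (out : List Int) : Prop := out = get_duplicate_indices_alt words
instance (words : List String) (out : List Int) : Decidable (Spec_get_duplicate_indices words out) := by unfold Spec_get_duplicate_indices; infer_instance

-- ===== CLAIM (what is proved, stated in full; the proofs are below) =====
def Claim_equal_get_duplicate_indices : Prop := ∀ (words : List String), Dom_get_duplicate_indices words → Spec_get_duplicate_indices words (get_duplicate_indices words)

-- ===== LEMMAS AND PROOFS =====

-- first index of w in words, as Python int (total form of words.index)
def pvIdx (words : List String) (w : String) : Int := ((PySem.List.index? words w).getD 0 : Nat)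

-- appending into an accumulator is mapping
theorem pvFoldlAppendMap {α β : Type} (l : List α) (f : α → β) (acc : List β) :
    l.foldl (fun a x => a ++ [f x]) acc = acc ++ l.map f := by
  induction l generalizing acc with
  | nil => simp
  | cons a t ih => simp [ih]

theorem pvStepB_pos (d : PySem.Dict String Int) (S : PySem.Set Int) (p : Int × String)
    (h : d.contains p.2 = true) : pvStepB (d, S) p = (d, PySem.Set.add S (d.getD p.2 0)) := by
  simp [pvStepB, h]

theorem pvStepB_neg (d : PySem.Dict String Int) (S : PySem.Set Int) (p : Int × String)
    (h : d.contains p.2 = false) : pvStepB (d, S) p = (d.insert p.2 p.1, S) := by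
  simp [pvStepB, h]

-- membership in the duplicate-index set after B's pass
theorem pvFold_mem (ws : List String) (s : Int) (d : PySem.Dict String Int)
    (S : PySem.Set Int) (x : Int) :
    (x ∈ ((PySem.List.enumerate ws s).foldl pvStepB (d, S)).2) ↔
      (x ∈ S ∨ ∃ w ∈ ws,
        (match d.get? w with
         | some v => x = v
         | none => 2 ≤ ws.count w ∧ ∃ k, PySem.List.index? ws w = some k ∧ x = s + (k : Int))) := by
  induction ws generalizing s d S with
  | nil => simp [PySem.List.enumerate_nil]
  | cons a t ih =>
    rw [PySem.List.enumerate_cons, List.foldl_cons]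
    by_cases hc : d.contains a = true
    · have hsome : (d.get? a).isSome := by
        rw [← PySem.Dict.contains_eq_isSome_get?]; exact hc
      obtain ⟨v, hv⟩ := Option.isSome_iff_exists.mp hsome
      have hvD : d.getD a 0 = v := by rw [PySem.Dict.getD_eq_get?_getD, hv]; rfl
      rw [pvStepB_pos d S (s, a) hc]
      dsimp only
      rw [ih (s + 1) d _, PySem.Set.mem_add, hvD]
      constructor
      · rintro ((hS | rfl) | ⟨w, hwmem, hcond⟩)
        · exact Or.inl hS
        · exact Or.inr ⟨a, List.mem_cons_self, by rw [hv]⟩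
        · refine Or.inr ⟨w, List.mem_cons_of_mem a hwmem, ?_⟩
          rcases hg : d.get? w with _ | u
          · rw [hg] at hcond
            have hwa : w ≠ a := by rintro rfl; rw [hv] at hg; cases hg
            obtain ⟨hcnt, k, hk, hx⟩ := hcond
            refine ⟨?_, k + 1, ?_, ?_⟩
            · rw [List.count_cons_of_ne (fun h => hwa (Eq.symm h))]; exact hcnt
            · rw [PySem.List.index?_cons_of_ne t (fun h => hwa (Eq.symm h)), hk]; rfl
            · push_cast; omega
          · rw [hg] at hcond; exact hcond
      · rintro (hS | ⟨w, hwmem, hcond⟩)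
        · exact Or.inl (Or.inl hS)
        · by_cases hwa : w = a
          · subst hwa
            rw [hv] at hcond
            exact Or.inl (Or.inr hcond)
          · have hwt : w ∈ t := by
              rcases List.mem_cons.mp hwmem with h | h
              · exact absurd h hwa
              · exact h
            refine Or.inr ⟨w, hwt, ?_⟩
            rcases hg : d.get? w with _ | u
            · rw [hg] at hcond
              obtain ⟨hcnt, k, hk, hx⟩ := hcond
              rw [List.count_cons_of_ne (fun h => hwa (Eq.symm h))] at hcnt
              rw [PySem.List.index?_cons_of_ne t (fun h => hwa (Eq.symm h))] at hk
              rcases hk' : PySem.List.index? t w with _ | k'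
              · rw [hk'] at hk; cases hk
              · rw [hk'] at hk
                simp only [Option.map_some, Option.some.injEq] at hk
                refine ⟨hcnt, k', rfl, ?_⟩
                subst hk; push_cast at hx ⊢; omega
            · rw [hg] at hcond; exact hcond
    · have hcf : d.contains a = false := eq_false_of_ne_true hc
      have hga : d.get? a = none := by
        rw [PySem.Dict.get?_eq_none_iff_contains]; exact hcf
      rw [pvStepB_neg d S (s, a) hcf]
      dsimp only
      rw [ih (s + 1) _ S]
      constructor
      · rintro (hS | ⟨w, hwmem, hcond⟩)
        · exact Or.inl hS
        · by_cases hwa : w = a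
          · subst hwa
            rw [PySem.Dict.get?_insert_self] at hcond
            refine Or.inr ⟨w, List.mem_cons_self, ?_⟩
            rw [hga]
            refine ⟨?_, 0, PySem.List.index?_cons_self w t, by simpa using hcond⟩
            rw [List.count_cons_self]
            have : 1 ≤ t.count w := List.count_pos_iff.mpr hwmem
            omega
          · rw [PySem.Dict.get?_insert_of_ne d s hwa] at hcond
            refine Or.inr ⟨w, List.mem_cons_of_mem a hwmem, ?_⟩
            rcases hg : d.get? w with _ | u
            · rw [hg] at hcond
              obtain ⟨hcnt, k, hk, hx⟩ := hcond
              refine ⟨by rw [List.count_cons_of_ne (fun h => hwa (Eq.symm h))]; exact hcnt, k + 1, ?_, by push_cast; omega⟩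
              rw [PySem.List.index?_cons_of_ne t (fun h => hwa (Eq.symm h)), hk]; rfl
            · rw [hg] at hcond; exact hcond
      · rintro (hS | ⟨w, hwmem, hcond⟩)
        · exact Or.inl hS
        · by_cases hwa : w = a
          · subst hwa
            rw [hga] at hcond
            obtain ⟨hcnt, k, hk, hx⟩ := hcond
            rw [PySem.List.index?_cons_self w t] at hk
            cases hk
            rw [List.count_cons_self] at hcnt
            have hwt : w ∈ t := List.count_pos_iff.mp (by omega)
            refine Or.inr ⟨w, hwt, ?_⟩
            rw [PySem.Dict.get?_insert_self]
            simpa using hx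
          · have hwt : w ∈ t := by
              rcases List.mem_cons.mp hwmem with h | h
              · exact absurd h hwa
              · exact h
            refine Or.inr ⟨w, hwt, ?_⟩
            rw [PySem.Dict.get?_insert_of_ne d s hwa]
            rcases hg : d.get? w with _ | u
            · rw [hg] at hcond
              obtain ⟨hcnt, k, hk, hx⟩ := hcond
              rw [List.count_cons_of_ne (fun h => hwa (Eq.symm h))] at hcnt
              rw [PySem.List.index?_cons_of_ne t (fun h => hwa (Eq.symm h))] at hk
              rcases hk' : PySem.List.index? t w with _ | k'
              · rw [hk'] at hk; cases hk
              · rw [hk'] at hk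
                simp only [Option.map_some, Option.some.injEq] at hk
                refine ⟨hcnt, k', rfl, ?_⟩
                subst hk; push_cast at hx ⊢; omega
            · rw [hg] at hcond; exact hcond

theorem pvFold_nodup (ws : List String) (s : Int) (d : PySem.Dict String Int)
    (S : PySem.Set Int) (h : S.Nodup) :
    (((PySem.List.enumerate ws s).foldl pvStepB (d, S)).2).Nodup := by
  induction ws generalizing s d S with
  | nil => simpa [PySem.List.enumerate_nil]
  | cons a t ih =>
    rw [PySem.List.enumerate_cons, List.foldl_cons]
    by_cases hc : d.contains a = true
    · rw [pvStepB_pos d S (s, a) hc]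
      exact ih (s + 1) d _ (PySem.Set.nodup_add _ _ h)
    · rw [pvStepB_neg d S (s, a) (eq_false_of_ne_true hc)]
      exact ih (s + 1) _ S h

-- pvIdx is injective on members of words
theorem pvIdx_inj (words : List String) (k1 k2 : String) (h1 : k1 ∈ words) (h2 : k2 ∈ words)
    (h : pvIdx words k1 = pvIdx words k2) : k1 = k2 := by
  obtain ⟨j1, hj1⟩ := Option.isSome_iff_exists.mp ((PySem.List.index?_isSome_iff words k1).mpr h1)
  obtain ⟨j2, hj2⟩ := Option.isSome_iff_exists.mp ((PySem.List.index?_isSome_iff words k2).mpr h2)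
  obtain ⟨hk1, he1, -⟩ := PySem.List.getElem_of_index?_eq_some hj1
  obtain ⟨hk2, he2, -⟩ := PySem.List.getElem_of_index?_eq_some hj2
  unfold pvIdx at h
  rw [hj1, hj2] at h
  simp only [Option.getD_some] at h
  have : j1 = j2 := by exact_mod_cast h
  subst this
  rw [← he1, ← he2]

-- ===== VERDICT (by name: the statement is the Claim_ definition above) =====
-- the list A sorts is a permutation of the set B sorts
theorem pv_perm (words : List String) :
    (((PySem.List.sorted (PySem.Dict.counter words).items (fun p => p.2) true).filter
        (fun p => decide (p.2 > 1))).map (fun p => p.1)).map (pvIdx words) |>.Perm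
      ((PySem.List.enumerate words 0).foldl pvStepB (PySem.Dict.empty, PySem.Set.empty)).2 := by
  have hD : (((PySem.Dict.counter words).items.filter (fun p => decide (p.2 > 1))).map
      (fun p => p.1)).map (pvIdx words)
      = ((PySem.Set.ofList words).filter
          (fun k => decide (((words.count k : Int)) > 1))).map (pvIdx words) := by
    rw [PySem.Dict.items_counter, List.filter_map, List.map_map, List.map_map]
    rfl
  have h1 : (((PySem.List.sorted (PySem.Dict.counter words).items (fun p => p.2) true).filter
        (fun p => decide (p.2 > 1))).map (fun p => p.1)).map (pvIdx words) |>.Perm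
      ((((PySem.Dict.counter words).items.filter (fun p => decide (p.2 > 1))).map
        (fun p => p.1)).map (pvIdx words)) :=
    (((PySem.List.sorted_perm _ _ _).filter _).map _).map _
  refine h1.trans ?_
  rw [hD]
  -- two Nodup lists with the same members
  have hMnodup : (((PySem.Set.ofList words).filter
      (fun k => decide (((words.count k : Int)) > 1))).map (pvIdx words)).Nodup := by
    apply List.Nodup.map_on
    · intro k1 hk1 k2 hk2 h
      exact pvIdx_inj words k1 k2
        ((PySem.Set.mem_ofList words k1).mp (List.mem_of_mem_filter hk1))
        ((PySem.Set.mem_ofList words k2).mp (List.mem_of_mem_filter hk2)) h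
    · exact (PySem.Set.nodup_ofList words).filter _
  have hBnodup : (((PySem.List.enumerate words 0).foldl pvStepB
      (PySem.Dict.empty, PySem.Set.empty)).2).Nodup :=
    pvFold_nodup words 0 _ _ List.nodup_nil
  rw [List.perm_ext_iff_of_nodup hMnodup hBnodup]
  intro x
  rw [pvFold_mem words 0 _ _ x]
  simp only [List.mem_map, List.mem_filter, PySem.Set.mem_ofList, PySem.Dict.get?_empty,
    PySem.Set.empty, List.not_mem_nil, false_or, decide_eq_true_eq]
  constructor
  · rintro ⟨k, ⟨hkmem, hcnt⟩, rfl⟩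
    obtain ⟨j, hj⟩ := Option.isSome_iff_exists.mp ((PySem.List.index?_isSome_iff words k).mpr hkmem)
    refine ⟨k, hkmem, by omega, j, hj, ?_⟩
    unfold pvIdx
    rw [hj]
    simp
  · rintro ⟨w, hwmem, hcnt, k, hk, rfl⟩
    refine ⟨w, ⟨hwmem, by omega⟩, ?_⟩
    unfold pvIdx
    rw [hk]
    simp
theorem pv_main (words : List String) :
    get_duplicate_indices words = get_duplicate_indices_alt words := by
  unfold get_duplicate_indices get_duplicate_indices_alt
  dsimp only
  rw [pvFoldlAppendMap]
  rw [List.nil_append]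
  exact PySem.List.sorted_eq_sorted_of_perm _ _ (fun x => x)
    (fun a b h => h) (pv_perm words)

theorem get_duplicate_indices_spec : Claim_equal_get_duplicate_indices := by
  intro words _
  exact pv_main words
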